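-- pv_equiv track=rewrite | github.com/anmolranjan1/6Companies30days | Amazon/2456. Most Popular Video Creator.py | mostPopularCreator
-- ===== SOURCE A (Python) =====
-- from typing import List
--
-- def mostPopularCreator(creators: List[str], ids: List[str], views: List[int]) -> List[List[str]]:
--     d={}
--     for i in range(len(creators)):
--         cid,vid,view=creators[i],ids[i],views[i]
--         if(cid not in d):
--             d[cid]={'totalViewCount':0, 'videoList':[]}
--         d[cid]['totalViewCount']+=view
--         d[cid]['videoList'].append((view,vid))
--     clist=[(d[cid]['totalViewCount'],cid) for cid in d]
--     clist.sort(reverse=True)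
--     maxView=clist[0][0]
--     ans=[]
--     for totalView,cid in clist:
--         if(totalView!=maxView):
--             break
--         t=d[cid]['videoList']
--         t.sort(reverse=True)
--         mx=t[0][0]
--         for view,vid in t:
--             if(view!=mx):
--                 break
--             v=vid
--         ans.append([cid,v])
--     return ans
-- ===== SOURCE B (Python) =====
-- from typing import List
--
-- def mostPopularCreator(creators: List[str], ids: List[str], views: List[int]) -> List[List[str]]:
--     # One pass: per creator keep (running total, best view, best id) incrementally;
--     # no per-creator video lists and no per-creator sorts.
--     stats = {}  # cid -> (total, bestView, bestVid)
--     for cid, vid, view in zip(creators, ids, views):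
--         if cid in stats:
--             tot, bv, bi = stats[cid]
--             if view > bv or (view == bv and vid < bi):
--                 bv, bi = view, vid
--             stats[cid] = (tot + view, bv, bi)
--         else:
--             stats[cid] = (view, view, vid)
--     order = sorted(((tot, cid) for cid, (tot, _, _) in stats.items()), reverse=True)
--     mx = order[0][0]
--     ans = []
--     for tot, cid in order:
--         if tot != mx:
--             break
--         ans.append([cid, stats[cid][2]])
--     return ans
-- ===== Notes on version B (the rewrite author's own statement) =====
-- stated objective: faster
-- what changed: B replaces A's per-creator video lists plus a full sort of each creator's videos (and an inner scan of the sorted list) by a single pass that keeps, per creator, the running total and the incrementally maintained (max-view, min-id) best video, so only the distinct creators are sorted at the end.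
import Mathlib
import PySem

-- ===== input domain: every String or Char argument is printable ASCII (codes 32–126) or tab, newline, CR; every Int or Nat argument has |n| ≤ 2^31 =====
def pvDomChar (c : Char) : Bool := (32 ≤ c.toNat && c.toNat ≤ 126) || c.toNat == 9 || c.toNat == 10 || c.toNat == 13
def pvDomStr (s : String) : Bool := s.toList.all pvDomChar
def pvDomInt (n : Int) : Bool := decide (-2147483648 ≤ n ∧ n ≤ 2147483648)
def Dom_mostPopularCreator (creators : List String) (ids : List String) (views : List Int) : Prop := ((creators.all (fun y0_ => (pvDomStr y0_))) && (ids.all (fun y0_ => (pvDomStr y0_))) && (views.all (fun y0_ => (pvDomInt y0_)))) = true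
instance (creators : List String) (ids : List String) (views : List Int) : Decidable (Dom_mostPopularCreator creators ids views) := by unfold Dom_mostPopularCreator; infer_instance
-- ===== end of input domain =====

-- B replaces A's per-creator video lists and per-creator sorts by a single incremental pass
-- keeping (running total, best view, best id) per creator; only the distinct creators are sorted (objective: faster).

-- ===== PORT A =====
-- A's inner 'for view, vid in t: if view != mx: break; v = vid' loop (v starts unset;
-- "" stands for the unset v, never returned when t is nonempty with t[0][0] = mx)
def aPickVid (mx : Int) : List (Int × String) → String → String
  | [], v => v
  | (view, vid) :: rest, v => if view ≠ mx then v else aPickVid mx rest vid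

-- A's outer 'for totalView, cid in clist: if totalView != maxView: break; …' loop
def aCollect (d : PySem.Dict String (Int × List (Int × String))) (maxView : Int) :
    List (Int × String) → List (List String) → List (List String)
  | [], ans => ans
  | (totalView, cid) :: rest, ans =>
    if totalView ≠ maxView then ans
    else
      let t := PySem.List.sorted2 ((d.getD cid (0, [])).2) Prod.fst Prod.snd true
      let mx := (PySem.List.pyGetD t 0 (0, "")).1
      let v := aPickVid mx t ""
      aCollect d maxView rest (ans ++ [[cid, v]])

def mostPopularCreator (creators : List String) (ids : List String) (views : List Int) : List (List String) :=
  let d := (PySem.List.pyRange 0 (PySem.List.len creators)).foldl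
    (fun d i =>
      let cid := PySem.List.pyGetD creators i ""
      let vid := PySem.List.pyGetD ids i ""
      let view := PySem.List.pyGetD views i 0
      let d1 := if d.contains cid then d else d.insert cid ((0 : Int), ([] : List (Int × String)))
      let p := d1.getD cid (0, [])
      d1.insert cid (p.1 + view, p.2 ++ [(view, vid)]))
    PySem.Dict.empty
  let clist := d.keys.map (fun cid => ((d.getD cid (0, [])).1, cid))
  let clistS := PySem.List.sorted2 clist Prod.fst Prod.snd true
  let maxView := (PySem.List.pyGetD clistS 0 (0, "")).1
  aCollect d maxView clistS []

-- ===== PORT B =====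
-- B's final 'for tot, cid in order: if tot != mx: break; ans.append([cid, stats[cid][2]])' loop
def bCollect (st : PySem.Dict String (Int × Int × String)) (mx : Int) :
    List (Int × String) → List (List String) → List (List String)
  | [], ans => ans
  | (tot, cid) :: rest, ans =>
    if tot ≠ mx then ans
    else bCollect st mx rest (ans ++ [[cid, (st.getD cid (0, 0, "")).2.2]])

def mostPopularCreator_alt (creators : List String) (ids : List String) (views : List Int) : List (List String) :=
  let stats := (creators.zip (ids.zip views)).foldl
    (fun st x =>
      let cid := x.1
      let vid := x.2.1
      let view := x.2.2
      if st.contains cid then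
        let q := st.getD cid (0, 0, "")
        let bb := if view > q.2.1 ∨ (view = q.2.1 ∧ vid < q.2.2) then (view, vid) else (q.2.1, q.2.2)
        st.insert cid (q.1 + view, bb.1, bb.2)
      else st.insert cid (view, view, vid))
    PySem.Dict.empty
  let order := PySem.List.sorted2 (stats.items.map (fun kv => (kv.2.1, kv.1))) Prod.fst Prod.snd true
  let mx := (PySem.List.pyGetD order 0 (0, "")).1
  bCollect stats mx order []

-- ===== PRECONDITION & SPEC =====
-- Pre_ excludes exactly the inputs where A raises: creators = [] (IndexError at clist[0]) and
-- ids or views shorter than creators (IndexError at ids[i] / views[i]).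
def Pre_mostPopularCreator (creators : List String) (ids : List String) (views : List Int) : Prop :=
  creators ≠ [] ∧ creators.length ≤ ids.length ∧ creators.length ≤ views.length
instance (creators : List String) (ids : List String) (views : List Int) : Decidable (Pre_mostPopularCreator creators ids views) := by unfold Pre_mostPopularCreator; infer_instance

def pvWitness_mostPopularCreator : List String × List String × List Int := (["a", "b", "a"], ["v1", "v2", "v3"], [5, 7, 2])

def Spec_mostPopularCreator (creators : List String) (ids : List String) (views : List Int) (out : List (List String)) : Prop := out = mostPopularCreator_alt creators ids views
instance (creators : List String) (ids : List String) (views : List Int) (out : List (List String)) : Decidable (Spec_mostPopularCreator creators ids views out) := by unfold Spec_mostPopularCreator; infer_instance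

-- ===== CLAIM (what is proved, stated in full; the proofs are below) =====
def Claim_equal_mostPopularCreator : Prop := ∀ (creators : List String) (ids : List String) (views : List Int), Dom_mostPopularCreator creators ids views → Pre_mostPopularCreator creators ids views → Spec_mostPopularCreator creators ids views (mostPopularCreator creators ids views)

-- ===== LEMMAS AND PROOFS =====


def better (b p : Int × String) : Int × String :=
  if p.1 > b.1 ∨ (p.1 = b.1 ∧ p.2 < b.2) then p else b

def bestOf : List (Int × String) → Int × String
  | [] => (0, "")
  | p :: r => r.foldl better p

def Lle (q b : Int × String) : Prop := q.1 < b.1 ∨ (q.1 = b.1 ∧ b.2 ≤ q.2)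

def pltB (a b : Int × String) : Bool := decide (a.1 < b.1) || (!decide (b.1 < a.1) && decide (a.2 < b.2))

def Desc (a b : Int × String) : Prop := pltB a b = false

lemma pltB_true_iff (a b : Int × String) : pltB a b = true ↔ (a.1 < b.1 ∨ (a.1 = b.1 ∧ a.2 < b.2)) := by
  unfold pltB
  simp only [Bool.or_eq_true, Bool.and_eq_true, Bool.not_eq_true', decide_eq_true_eq,
    decide_eq_false_iff_not]
  constructor
  · rintro (h | ⟨h1, h2⟩)
    · exact Or.inl h
    · rcases lt_trichotomy a.1 b.1 with h3 | h3 | h3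
      · exact Or.inl h3
      · exact Or.inr ⟨h3, h2⟩
      · exact absurd h3 h1
  · rintro (h | ⟨h1, h2⟩)
    · exact Or.inl h
    · exact Or.inr ⟨by omega, h2⟩

lemma pltB_false_iff (a b : Int × String) : Desc a b ↔ (b.1 < a.1 ∨ (b.1 = a.1 ∧ b.2 ≤ a.2)) := by
  unfold Desc
  constructor
  · intro h
    have h' : ¬(a.1 < b.1 ∨ (a.1 = b.1 ∧ a.2 < b.2)) := by rw [← pltB_true_iff]; simp [h]
    rcases lt_trichotomy a.1 b.1 with h3 | h3 | h3
    · exact absurd (Or.inl h3) h'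
    · refine Or.inr ⟨h3.symm, ?_⟩
      by_contra hs
      exact h' (Or.inr ⟨h3, not_le.1 hs⟩)
    · exact Or.inl h3
  · intro h
    rcases Bool.eq_false_or_eq_true (pltB a b) with hb | hb
    swap
    · exact hb
    · rw [pltB_true_iff] at hb
      rcases h with h | ⟨he, hs⟩ <;> rcases hb with hb | ⟨hbe, hbs⟩
      · omega
      · omega
      · omega
      · exact absurd (lt_of_lt_of_le hbs hs) (lt_irrefl _)

lemma Lle_refl (p : Int × String) : Lle p p := Or.inr ⟨rfl, le_refl _⟩

lemma Lle_trans {a b c : Int × String} (h1 : Lle a b) (h2 : Lle b c) : Lle a c := by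
  rcases h1 with h1 | ⟨e1, s1⟩ <;> rcases h2 with h2 | ⟨e2, s2⟩
  · exact Or.inl (lt_trans h1 h2)
  · exact Or.inl (e2 ▸ h1)
  · exact Or.inl (e1 ▸ h2)
  · exact Or.inr ⟨e1.trans e2, le_trans s2 s1⟩

lemma Lle_better_left (b p : Int × String) : Lle b (better b p) := by
  unfold better; split_ifs with h
  · rcases h with h | ⟨he, hs⟩
    · exact Or.inl h
    · exact Or.inr ⟨he.symm, le_of_lt hs⟩
  · exact Lle_refl b

lemma Lle_better_right (b p : Int × String) : Lle p (better b p) := by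
  unfold better; split_ifs with h
  · exact Lle_refl p
  · rcases not_or.1 h with ⟨h1, h2⟩
    rcases lt_trichotomy p.1 b.1 with h3 | h3 | h3
    · exact Or.inl h3
    · refine Or.inr ⟨h3, ?_⟩
      by_contra hs
      exact h2 ⟨h3, not_le.1 hs⟩
    · exact absurd h3 h1

lemma better_eq (b p : Int × String) : better b p = b ∨ better b p = p := by
  unfold better; split_ifs <;> simp

lemma foldl_better_spec : ∀ (r : List (Int × String)) (p : Int × String),
    (r.foldl better p = p ∨ r.foldl better p ∈ r) ∧ Lle p (r.foldl better p) ∧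
      ∀ q ∈ r, Lle q (r.foldl better p) := by
  intro r
  induction r with
  | nil => exact fun p => ⟨Or.inl rfl, Lle_refl p, by simp⟩
  | cons x r ih =>
    intro p
    obtain ⟨hmem, hle, hub⟩ := ih (better p x)
    refine ⟨?_, ?_, ?_⟩
    · have hfold : List.foldl better p (x :: r) = List.foldl better (better p x) r := rfl
      rcases hmem with hm | hm
      · rcases better_eq p x with hb | hb
        · exact Or.inl (by rw [hfold, hm, hb])
        · refine Or.inr ?_
          rw [hfold, hm, hb]
          exact List.mem_cons_self
      · refine Or.inr ?_
        rw [hfold]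
        exact List.mem_cons_of_mem x hm
    · exact Lle_trans (Lle_better_left p x) hle
    · intro q hq
      rcases List.mem_cons.1 hq with hq | hq
      · subst hq; exact Lle_trans (Lle_better_right p q) hle
      · exact hub q hq

lemma bestOf_spec (vl : List (Int × String)) (h : vl ≠ []) :
    bestOf vl ∈ vl ∧ ∀ q ∈ vl, Lle q (bestOf vl) := by
  cases vl with
  | nil => exact absurd rfl h
  | cons p r =>
    obtain ⟨hmem, hle, hub⟩ := foldl_better_spec r p
    refine ⟨?_, ?_⟩
    · rcases hmem with hm | hm
      · simp [bestOf, hm]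
      · simp [bestOf]; right; exact hm
    · intro q hq
      rcases List.mem_cons.1 hq with hq | hq
      · subst hq; exact hle
      · exact hub q hq



lemma insertBy_desc (x : Int × String) : ∀ (ys : List (Int × String)), ys.Pairwise Desc →
    (PySem.List.insertBy (fun a b => pltB b a) x ys).Pairwise Desc := by
  intro ys
  induction ys with
  | nil => intro _; simp [PySem.List.insertBy]
  | cons y ys ih =>
    intro h
    rw [PySem.List.insertBy.eq_2]
    by_cases hb : pltB y x = true
    · simp only [hb, if_pos]
      refine List.Pairwise.cons ?_ h
      intro z hz
      rcases List.mem_cons.1 hz with hz | hz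
      · subst hz
        rw [pltB_false_iff]
        rw [pltB_true_iff] at hb
        rcases hb with hb | ⟨he, hs⟩
        · exact Or.inl hb
        · exact Or.inr ⟨he, le_of_lt hs⟩
      · -- z ∈ ys : Desc y z and y <lex x give Desc x z
        have hyz : Desc y z := (List.pairwise_cons.1 h).1 z hz
        rw [pltB_false_iff] at hyz ⊢
        rw [pltB_true_iff] at hb
        rcases hb with hb | ⟨he, hs⟩ <;> rcases hyz with hz' | ⟨hze, hzs⟩
        · exact Or.inl (lt_trans hz' hb)
        · exact Or.inl (hze ▸ hb)
        · exact Or.inl (he ▸ hz')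
        · exact Or.inr ⟨hze.trans he, le_of_lt (lt_of_le_of_lt hzs hs)⟩
    · simp only [hb, if_neg, Bool.false_eq_true, not_false_iff]
      obtain ⟨hy, ht⟩ := List.pairwise_cons.1 h
      refine List.Pairwise.cons ?_ (ih ht)
      intro w hw
      rcases (PySem.List.insertBy_mem_iff _ x w ys).1 hw with hw | hw
      · subst hw
        exact Bool.eq_false_iff.2 (fun hc => hb (by simpa using hc))
      · exact hy w hw

lemma sorted2_desc (vl : List (Int × String)) :
    (PySem.List.sorted2 vl Prod.fst Prod.snd true).Pairwise Desc := by
  have haux : ∀ (l : List (Int × String)) (acc : List (Int × String)), acc.Pairwise Desc →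
      (l.foldl (fun acc x => PySem.List.insertBy (fun a b => pltB b a) x acc) acc).Pairwise Desc := by
    intro l
    induction l with
    | nil => exact fun acc h => h
    | cons x l ih => exact fun acc h => ih _ (insertBy_desc x acc h)
  exact haux vl [] (List.Pairwise.nil)

lemma aPick_spec : ∀ (t : List (Int × String)) (m : Int) (v : String), t.Pairwise Desc →
    (∀ p ∈ t, p.1 ≤ m) →
    (aPickVid m t v = v ∧ ∀ p ∈ t, p.1 ≠ m) ∨
    (∃ p, p ∈ t ∧ p.1 = m ∧ aPickVid m t v = p.2 ∧ ∀ q ∈ t, q.1 = m → aPickVid m t v ≤ q.2) := by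
  intro t
  induction t with
  | nil => intro m v _ _; exact Or.inl ⟨rfl, by simp⟩
  | cons x rest ih =>
    intro m v hpw hub
    obtain ⟨hx, htl⟩ := List.pairwise_cons.1 hpw
    obtain ⟨view, vid⟩ := x
    by_cases hv : view = m
    · subst hv
      have hstep : aPickVid view ((view, vid) :: rest) v = aPickVid view rest vid := by
        simp [aPickVid]
      have hub' : ∀ p ∈ rest, p.1 ≤ view := fun p hp => hub p (List.mem_cons_of_mem _ hp)
      rcases ih view vid htl hub' with ⟨he, hnone⟩ | ⟨p, hp, hpm, hpe, hplb⟩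
      · refine Or.inr ⟨(view, vid), List.mem_cons_self, rfl, by rw [hstep]; exact he, ?_⟩
        intro q hq hqm
        rcases List.mem_cons.1 hq with hq | hq
        · subst hq
          rw [hstep]
          exact le_of_eq he
        · exact absurd hqm (hnone q hq)
      · refine Or.inr ⟨p, List.mem_cons_of_mem _ hp, hpm, by rw [hstep]; exact hpe, ?_⟩
        intro q hq hqm
        rcases List.mem_cons.1 hq with hq | hq
        · -- q = head; aPick result = p.2 ≤ vid since p ≤lex head with equal fst
          subst hq
          have hdx : Desc (view, vid) p := hx p hp
          rw [pltB_false_iff] at hdx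
          rw [hstep]
          rcases hdx with hd | ⟨_, hd⟩
          · exact absurd hpm (by simp at hd ⊢; omega)
          · rw [hpe]; exact hd
        · rw [hstep]
          exact hplb q hq hqm
    · -- head breaks the loop: result v, and nothing below reaches m
      have hstep : aPickVid m ((view, vid) :: rest) v = v := by
        simp [aPickVid, hv]
      refine Or.inl ⟨hstep, ?_⟩
      intro p hp
      rcases List.mem_cons.1 hp with hp | hp
      · subst hp; exact hv
      · have hd : Desc (view, vid) p := hx p hp
        rw [pltB_false_iff] at hd
        have h1 : view ≤ m := hub (view, vid) List.mem_cons_self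
        rcases hd with hd | ⟨hd, _⟩
        · simp at hd; omega
        · simp at hd; omega

lemma crux (vl : List (Int × String)) (h : vl ≠ []) :
    aPickVid (PySem.List.pyGetD (PySem.List.sorted2 vl Prod.fst Prod.snd true) 0 (0, "")).1
      (PySem.List.sorted2 vl Prod.fst Prod.snd true) "" = (bestOf vl).2 := by
  set t := PySem.List.sorted2 vl Prod.fst Prod.snd true with ht
  have hperm : t.Perm vl := PySem.List.sorted2_perm vl Prod.fst Prod.snd true
  have htne : t ≠ [] := by
    intro he
    apply h
    have hl := hperm.length_eq
    rw [he] at hl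
    exact List.eq_nil_of_length_eq_zero hl.symm
  obtain ⟨h0, t', ht'⟩ := List.exists_cons_of_ne_nil htne
  have hpw := sorted2_desc vl
  rw [← ht] at hpw
  obtain ⟨hB, hBub⟩ := bestOf_spec vl h
  set B := bestOf vl with hBdef
  -- every element of t is ≤lex h0
  have hhd : ∀ p ∈ t', Desc h0 p := (List.pairwise_cons.1 (ht' ▸ hpw)).1
  have hle : ∀ p ∈ t', p.1 ≤ h0.1 := by
    intro p hp
    have := (pltB_false_iff _ _).1 (hhd p hp)
    rcases this with h' | ⟨h', _⟩ <;> omega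
  -- B.1 = h0.1
  have hBmem_t : B ∈ t := hperm.mem_iff.2 hB
  have hB1 : B.1 = h0.1 := by
    have h1 : h0.1 ≤ B.1 := by
      have : Lle h0 B := hBub h0 (hperm.mem_iff.1 (ht' ▸ List.mem_cons_self))
      rcases this with h' | ⟨h', _⟩ <;> omega
    have h2 : B.1 ≤ h0.1 := by
      rw [ht'] at hBmem_t
      rcases List.mem_cons.1 hBmem_t with hb | hb
      · rw [hb]
      · exact hle B hb
    omega
  -- B.2 ≤ h0.2
  have hB2h0 : B.2 ≤ h0.2 := by
    have : Lle h0 B := hBub h0 (hperm.mem_iff.1 (ht' ▸ List.mem_cons_self))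
    rcases this with h' | ⟨_, h'⟩
    · omega
    · exact h'
  -- unfold one step of aPickVid : head has view = mx
  have hmx : (PySem.List.pyGetD t 0 (0, "")).1 = h0.1 := by
    rw [ht', PySem.List.pyGetD_zero_cons]
  rw [hmx, ht']
  have hstep : aPickVid h0.1 (h0 :: t') "" = aPickVid h0.1 t' h0.2 := by
    obtain ⟨a, b⟩ := h0; simp [aPickVid]
  rw [hstep]
  rcases aPick_spec t' h0.1 h0.2 (ht' ▸ hpw).tail hle with ⟨he, hnone⟩ | ⟨p, hp, hpm, hpe, hplb⟩
  · -- no element of t' has fst = h0.1, so B = h0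
    rw [he]
    have : B = h0 := by
      rw [ht'] at hBmem_t
      rcases List.mem_cons.1 hBmem_t with hb | hb
      · exact hb
      · exact absurd hB1 (hnone B hb)
    rw [this]
  · -- result = p.2; antisymmetry with B.2
    have hpmem : p ∈ vl := hperm.mem_iff.1 (ht' ▸ List.mem_cons_of_mem _ hp)
    have hBle : B.2 ≤ p.2 := by
      rcases hBub p hpmem with h' | ⟨_, h'⟩
      · omega
      · exact h'
    have hleB : aPickVid h0.1 t' h0.2 ≤ B.2 := by
      rw [ht'] at hBmem_t
      rcases List.mem_cons.1 hBmem_t with hb | hb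
      · -- B = h0 : result = p.2 ≤ h0.2 via Desc h0 p with p.1 = h0.1
        have hdx := (pltB_false_iff _ _).1 (hhd p hp)
        rcases hdx with h' | ⟨_, h'⟩
        · omega
        · rw [hpe, hb]; exact h'
      · exact hplb B hb (hB1)
    rw [hpe] at hleB ⊢
    exact le_antisymm hleB (hpe ▸ hBle)



def faStep (v? : Option (Int × List (Int × String))) (vid : String) (view : Int) : Int × List (Int × String) :=
  let p := v?.getD (0, [])
  (p.1 + view, p.2 ++ [(view, vid)])

def fbStep (v? : Option (Int × Int × String)) (vid : String) (view : Int) : Int × Int × String :=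
  match v? with
  | none => (view, view, vid)
  | some q => (q.1 + view, if view > q.2.1 ∨ (view = q.2.1 ∧ vid < q.2.2) then (view, vid) else (q.2.1, q.2.2))

def gRel (a : Int × List (Int × String)) : Int × Int × String := (a.1, bestOf a.2)

lemma bestOf_append (vl : List (Int × String)) (p : Int × String) (h : vl ≠ []) :
    bestOf (vl ++ [p]) = better (bestOf vl) p := by
  cases vl with
  | nil => exact absurd rfl h
  | cons q r => simp [bestOf, List.foldl_append]

lemma stepA_eq (d : PySem.Dict String (Int × List (Int × String))) (cid vid : String) (view : Int) :
    (let d1 := if d.contains cid then d else d.insert cid ((0 : Int), ([] : List (Int × String)))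
     let p := d1.getD cid (0, [])
     d1.insert cid (p.1 + view, p.2 ++ [(view, vid)]))
    = d.insert cid (faStep (d.get? cid) vid view) := by
  by_cases h : d.contains cid
  · simp only [h, if_pos, faStep]
    rw [PySem.Dict.getD_eq_get?_getD]
  · simp only [h, Bool.false_eq_true, if_neg, not_false_iff]
    rw [PySem.Dict.getD_insert_self, PySem.Dict.insert_insert_self]
    have hn : d.get? cid = none := (PySem.Dict.get?_eq_none_iff_contains d cid).2 (by simp [h])
    rw [hn]
    rfl

lemma stepB_eq (st : PySem.Dict String (Int × Int × String)) (cid vid : String) (view : Int) :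
    (if st.contains cid then
       let q := st.getD cid (0, 0, "")
       let bb := if view > q.2.1 ∨ (view = q.2.1 ∧ vid < q.2.2) then (view, vid) else (q.2.1, q.2.2)
       st.insert cid (q.1 + view, bb.1, bb.2)
     else st.insert cid (view, view, vid))
    = st.insert cid (fbStep (st.get? cid) vid view) := by
  by_cases h : st.contains cid
  · simp only [h, if_pos]
    have hs : (st.get? cid).isSome := by rw [← PySem.Dict.contains_eq_isSome_get?, h]
    obtain ⟨q, hq⟩ := Option.isSome_iff_exists.1 hs
    rw [hq, PySem.Dict.getD_eq_get?_getD, hq]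
    simp only [Option.getD_some, fbStep]
  · simp only [h, Bool.false_eq_true, if_neg, not_false_iff]
    have hn : st.get? cid = none := (PySem.Dict.get?_eq_none_iff_contains st cid).2 (by simp [h])
    rw [hn]
    rfl

lemma get?_foldl_insertF {ν : Type} (F : Option ν → String × String × Int → ν) :
    ∀ (l : List (String × String × Int)) (d : PySem.Dict String ν) (c : String),
    (l.foldl (fun d x => d.insert x.1 (F (d.get? x.1) x)) d).get? c
      = (l.filter (fun x => x.1 == c)).foldl (fun v? x => some (F v? x)) (d.get? c) := by
  intro l
  induction l with
  | nil => intro d c; rfl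
  | cons x l ih =>
    intro d c
    rw [List.foldl_cons, ih]
    by_cases h : x.1 = c
    · rw [List.filter_cons_of_pos (by simp [h]), List.foldl_cons]
      congr 1
      rw [h, PySem.Dict.get?_insert_self]
    · rw [List.filter_cons_of_neg (by simp [h])]
      congr 1
      rw [PySem.Dict.get?_insert, if_neg (fun hc => h hc.symm)]

lemma foldl_getD_zip {β : Type} (f : β → String → String → Int → β) :
    ∀ (creators ids : List String) (views : List Int) (init : β),
    creators.length ≤ ids.length → creators.length ≤ views.length →
    (List.range creators.length).foldl
      (fun acc j => f acc (creators.getD j "") (ids.getD j "") (views.getD j 0)) init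
    = (creators.zip (ids.zip views)).foldl (fun acc x => f acc x.1 x.2.1 x.2.2) init := by
  intro creators
  induction creators with
  | nil => intro ids views init _ _; rfl
  | cons c cs ih =>
    intro ids views init hi hv
    cases ids with
    | nil => simp at hi
    | cons i is =>
      cases views with
      | nil => simp at hv
      | cons v vs =>
        rw [List.length_cons, List.range_succ_eq_map, List.foldl_cons, List.foldl_map]
        simp only [List.getD_cons_zero, List.getD_cons_succ]
        rw [ih is vs (f init c i v) (by simpa using hi) (by simpa using hv)]
        rfl

lemma foldl_range3 {β : Type} (f : β → String → String → Int → β) :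
    ∀ (creators ids : List String) (views : List Int) (init : β),
    creators.length ≤ ids.length → creators.length ≤ views.length →
    (PySem.List.pyRange 0 (PySem.List.len creators)).foldl
      (fun acc i => f acc (PySem.List.pyGetD creators i "") (PySem.List.pyGetD ids i "") (PySem.List.pyGetD views i 0)) init
    = (creators.zip (ids.zip views)).foldl (fun acc x => f acc x.1 x.2.1 x.2.2) init := by
  intro creators ids views init hi hv
  rw [PySem.List.len_eq, PySem.List.pyRange_zero_natCast, List.foldl_map]
  simp only [PySem.List.pyGetD_natCast]
  exact foldl_getD_zip f creators ids views init hi hv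

lemma fold_rel : ∀ (lc : List (String × String × Int)) (a : Option (Int × List (Int × String))),
    (∀ t vl, a = some (t, vl) → vl ≠ []) →
    lc.foldl (fun v? x => some (fbStep v? x.2.1 x.2.2)) (a.map gRel)
      = (lc.foldl (fun v? x => some (faStep v? x.2.1 x.2.2)) a).map gRel := by
  intro lc
  induction lc with
  | nil => intro a _; rfl
  | cons x lc ih =>
    intro a hne
    rw [List.foldl_cons, List.foldl_cons]
    have hstep : some (fbStep (a.map gRel) x.2.1 x.2.2) = (some (faStep a x.2.1 x.2.2)).map gRel := by
      cases a with
      | none => simp [fbStep, faStep, gRel, bestOf]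
      | some q =>
        obtain ⟨t, vl⟩ := q
        have hvl : vl ≠ [] := hne t vl rfl
        simp only [Option.map]
        simp only [fbStep, faStep, gRel, Option.getD_some]
        rw [bestOf_append vl _ hvl]
        rfl
    rw [hstep]
    exact ih (some (faStep a x.2.1 x.2.2)) (by
      intro t vl hvl
      simp only [faStep] at hvl
      cases hvl
      simp)

lemma fold_nonempty : ∀ (lc : List (String × String × Int)) (a : Option (Int × List (Int × String))),
    (∀ t vl, a = some (t, vl) → vl ≠ []) →
    ∀ t vl, lc.foldl (fun v? x => some (faStep v? x.2.1 x.2.2)) a = some (t, vl) → vl ≠ [] := by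
  intro lc
  induction lc with
  | nil => intro a hne; exact fun t vl h => hne t vl h
  | cons x lc ih =>
    intro a hne
    rw [List.foldl_cons]
    exact ih _ (by
      intro t vl hvl
      simp only [faStep] at hvl
      cases hvl
      simp)

lemma collect_eq (dA : PySem.Dict String (Int × List (Int × String))) (st : PySem.Dict String (Int × Int × String))
    (hrel : ∀ c, st.get? c = (dA.get? c).map gRel)
    (hne : ∀ c t vl, dA.get? c = some (t, vl) → vl ≠ []) (mx : Int) :
    ∀ (L : List (Int × String)) (ans : List (List String)), (∀ p ∈ L, p.2 ∈ dA.keys) →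
    aCollect dA mx L ans = bCollect st mx L ans := by
  intro L
  induction L with
  | nil => intro ans _; rfl
  | cons p L ih =>
    obtain ⟨tot, cid⟩ := p
    intro ans hmem
    by_cases hmx : tot = mx
    · have hcont : dA.contains cid = true :=
        (PySem.Dict.contains_iff_mem_keys dA cid).2 (hmem (tot, cid) List.mem_cons_self)
      have hs : (dA.get? cid).isSome := by rw [← PySem.Dict.contains_eq_isSome_get?, hcont]
      obtain ⟨q0, hq0⟩ := Option.isSome_iff_exists.1 hs
      obtain ⟨t0, vl0⟩ := q0
      have hvl0 : vl0 ≠ [] := hne cid t0 vl0 hq0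
      have hgA : dA.getD cid (0, []) = (t0, vl0) := by
        rw [PySem.Dict.getD_eq_get?_getD, hq0]; rfl
      have hgB : st.getD cid (0, 0, "") = (t0, bestOf vl0) := by
        rw [PySem.Dict.getD_eq_get?_getD, hrel cid, hq0]; rfl
      show (if tot ≠ mx then ans else _) = (if tot ≠ mx then ans else _)
      rw [if_neg (by simpa using hmx), if_neg (by simpa using hmx)]
      rw [hgA, hgB]
      show aCollect dA mx L (ans ++ [[cid,
          aPickVid (PySem.List.pyGetD (PySem.List.sorted2 vl0 Prod.fst Prod.snd true) 0 (0, "")).1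
            (PySem.List.sorted2 vl0 Prod.fst Prod.snd true) ""]])
        = bCollect st mx L (ans ++ [[cid, (bestOf vl0).2]])
      rw [crux vl0 hvl0]
      exact ih _ (fun p hp => hmem p (List.mem_cons_of_mem _ hp))
    · show (if tot ≠ mx then ans else _) = (if tot ≠ mx then ans else _)
      rw [if_pos hmx, if_pos hmx]

-- ===== VERDICT (by name: the statement is the Claim_ definition above) =====
theorem mostPopularCreator_spec : Claim_equal_mostPopularCreator := by
  intro creators ids views _ hpre
  obtain ⟨hne0, hi, hv⟩ := hpre
  unfold Spec_mostPopularCreator mostPopularCreator mostPopularCreator_alt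
  dsimp only []
  set l := creators.zip (ids.zip views) with hl
  -- A's loop as a fold over the zipped triples, then as a single-insert fold
  rw [foldl_range3 (fun d cid vid view =>
      (if d.contains cid then d else d.insert cid ((0 : Int), ([] : List (Int × String)))).insert cid
        (((if d.contains cid then d else d.insert cid ((0 : Int), ([] : List (Int × String)))).getD cid (0, [])).1 + view,
         ((if d.contains cid then d else d.insert cid ((0 : Int), ([] : List (Int × String)))).getD cid (0, [])).2 ++ [(view, vid)]))
    creators ids views PySem.Dict.empty hi hv]
  rw [PySem.List.foldl_congr_mem l _
      (fun d (x : String × String × Int) => d.insert x.1 (faStep (d.get? x.1) x.2.1 x.2.2))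
      PySem.Dict.empty (fun acc x _ => stepA_eq acc x.1 x.2.1 x.2.2)]
  rw [PySem.List.foldl_congr_mem l _
      (fun st (x : String × String × Int) => st.insert x.1 (fbStep (st.get? x.1) x.2.1 x.2.2))
      PySem.Dict.empty (fun acc x _ => stepB_eq acc x.1 x.2.1 x.2.2)]
  set dA := l.foldl (fun d (x : String × String × Int) => d.insert x.1 (faStep (d.get? x.1) x.2.1 x.2.2)) PySem.Dict.empty with hdA
  set st := l.foldl (fun st (x : String × String × Int) => st.insert x.1 (fbStep (st.get? x.1) x.2.1 x.2.2)) PySem.Dict.empty with hst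
  have hrel : ∀ c, st.get? c = (dA.get? c).map gRel := by
    intro c
    rw [hdA, hst, get?_foldl_insertF (fun v? x => faStep v? x.2.1 x.2.2) l PySem.Dict.empty c,
        get?_foldl_insertF (fun v? x => fbStep v? x.2.1 x.2.2) l PySem.Dict.empty c,
        PySem.Dict.get?_empty, PySem.Dict.get?_empty]
    exact fold_rel _ none (by intro t vl h; cases h)
  have hne : ∀ c t vl, dA.get? c = some (t, vl) → vl ≠ [] := by
    intro c t vl h
    rw [hdA, get?_foldl_insertF (fun v? x => faStep v? x.2.1 x.2.2) l PySem.Dict.empty c,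
        PySem.Dict.get?_empty] at h
    exact fold_nonempty _ none (by intro t vl h; cases h) t vl h
  have hkeys : st.keys = dA.keys := by
    rw [hdA, hst,
        PySem.Dict.keys_foldl_insert_key l (fun x => x.1) (fun d x => faStep (d.get? x.1) x.2.1 x.2.2) PySem.Dict.empty,
        PySem.Dict.keys_foldl_insert_key l (fun x => x.1) (fun st x => fbStep (st.get? x.1) x.2.1 x.2.2) PySem.Dict.empty]
    rfl
  have hnodupB : st.keys.Nodup := by
    rw [hst]
    exact PySem.Dict.nodup_keys_foldl_insert_key l (fun x => x.1) _ PySem.Dict.empty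
      (by rw [PySem.Dict.keys_empty]; exact List.nodup_nil)
  -- the (total, cid) list B sorts is exactly the one A sorts
  have hlist : st.items.map (fun kv => (kv.2.1, kv.1))
      = dA.keys.map (fun cid => ((dA.getD cid (0, [])).1, cid)) := by
    rw [PySem.Dict.items_eq_map_keys st hnodupB (0, 0, ""), List.map_map, hkeys]
    refine List.map_congr_left ?_
    intro c hc
    have hcont : dA.contains c = true := (PySem.Dict.contains_iff_mem_keys dA c).2 hc
    have hs : (dA.get? c).isSome := by rw [← PySem.Dict.contains_eq_isSome_get?, hcont]
    obtain ⟨q0, hq0⟩ := Option.isSome_iff_exists.1 hs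
    obtain ⟨t0, vl0⟩ := q0
    have h1 : st.getD c (0, 0, "") = (t0, bestOf vl0) := by
      rw [PySem.Dict.getD_eq_get?_getD, hrel c, hq0]; rfl
    have h2 : dA.getD c (0, []) = (t0, vl0) := by
      rw [PySem.Dict.getD_eq_get?_getD, hq0]; rfl
    simp [Function.comp, h1, h2]
  rw [hlist]
  exact collect_eq dA st hrel hne _ _ [] (by
    intro p hp
    have hp' : p ∈ dA.keys.map (fun cid => ((dA.getD cid (0, [])).1, cid)) :=
      (PySem.List.sorted2_perm _ Prod.fst Prod.snd true).mem_iff.1 hp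
    obtain ⟨c, hc, hpc⟩ := List.mem_map.1 hp'
    rw [← hpc]
    exact hc)
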